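-- pv_equiv track=rewrite | github.com/ba-00001/TIP-101-SPRING2-26 | week-2-session-1-and-session-2.py | find_min_index_of_repeating
-- ===== SOURCE A (Python) =====
-- def find_min_index_of_repeating(nums):
--     first_index = {}
--     best = None
--
--     for i in range(len(nums)):
--         x = nums[i]
--         if x not in first_index:
--             first_index[x] = i
--         else:
--             if best is None or first_index[x] < best:
--                 best = first_index[x]
--
--     return best
-- ===== SOURCE B (Python) =====
-- def find_min_index_of_repeating(nums):
--     counts = {}
--     for x in nums:
--         counts[x] = counts.get(x, 0) + 1
--     for i, x in enumerate(nums):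
--         if counts.get(x, 0) > 1:
--             return i
--     return None
-- ===== Notes on version B (the rewrite author's own statement) =====
-- stated objective: alternative
-- what changed: A's single interleaved pass tracking first-occurrence indices and a running best is replaced by two separate loops: first build a frequency table of all values, then scan forward and return the first index whose value has count > 1.
import Mathlib
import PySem

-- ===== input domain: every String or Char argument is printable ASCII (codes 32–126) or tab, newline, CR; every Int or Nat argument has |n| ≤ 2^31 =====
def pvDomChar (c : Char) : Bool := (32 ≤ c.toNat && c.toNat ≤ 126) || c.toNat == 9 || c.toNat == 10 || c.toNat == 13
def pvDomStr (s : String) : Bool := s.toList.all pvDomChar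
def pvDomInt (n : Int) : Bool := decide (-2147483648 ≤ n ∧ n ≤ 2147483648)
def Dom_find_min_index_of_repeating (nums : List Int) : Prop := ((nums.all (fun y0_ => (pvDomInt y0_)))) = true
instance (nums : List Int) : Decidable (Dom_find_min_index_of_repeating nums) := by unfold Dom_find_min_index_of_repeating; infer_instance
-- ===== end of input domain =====

-- B replaces A's interleaved first-index/best pass by a count table plus a forward index scan (alternative decomposition, same cost).

-- ===== PORT A =====
-- A's loop 'for i in range(len(nums)): x = nums[i]' visits exactly the pairs (i, nums[i]): ported as recursion over enumerate(nums).
def goA (fi : PySem.Dict Int Int) (best : Option Int) : List (Int × Int) → Option Int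
  | [] => best
  | (i, x) :: rest =>
    match fi.get? x with
    | none => goA (fi.insert x i) best rest
    | some j =>
      goA fi (match best with
              | none => some j
              | some b => if j < b then some j else some b) rest

def find_min_index_of_repeating (nums : List Int) : Option Int :=
  goA PySem.Dict.empty none (PySem.List.enumerate nums 0)

-- ===== PORT B =====
def goB (counts : PySem.Dict Int Int) : List (Int × Int) → Option Int
  | [] => none
  | (i, x) :: rest => if counts.getD x 0 > 1 then some i else goB counts rest

def find_min_index_of_repeating_alt (nums : List Int) : Option Int :=
  let counts := nums.foldl (fun d x => d.insert x (d.getD x 0 + 1)) PySem.Dict.empty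
  goB counts (PySem.List.enumerate nums 0)

-- ===== PRECONDITION & SPEC =====
def Spec_find_min_index_of_repeating (nums : List Int) (out : Option Int) : Prop := out = find_min_index_of_repeating_alt nums
instance (nums : List Int) (out : Option Int) : Decidable (Spec_find_min_index_of_repeating nums out) := by unfold Spec_find_min_index_of_repeating; infer_instance

-- ===== CLAIM (what is proved, stated in full; the proofs are below) =====
def Claim_equal_find_min_index_of_repeating : Prop := ∀ (nums : List Int), Dom_find_min_index_of_repeating nums → Spec_find_min_index_of_repeating nums (find_min_index_of_repeating nums)

-- ===== LEMMAS AND PROOFS =====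

-- first index whose element occurs again later (the common characterisation of both programs)
def fdup : List Int → Option Nat
  | [] => none
  | x :: xs => if x ∈ xs then some 0 else (fdup xs).map (· + 1)

-- first-occurrence index
def fo : List Int → Int → Nat
  | [], _ => 0
  | y :: p, x => if y = x then 0 else fo p x + 1

theorem fo_append_mem (p : List Int) (z x : Int) (h : x ∈ p) : fo (p ++ [z]) x = fo p x := by
  induction p with
  | nil => cases h
  | cons y q ih =>
    by_cases hyx : y = x
    · simp [fo, hyx]
    · have hx : x ∈ q := (List.mem_cons.mp h).resolve_left (fun e => hyx e.symm)
      simp [fo, hyx, ih hx]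

theorem fo_append_self (p : List Int) (x : Int) (h : x ∉ p) : fo (p ++ [x]) x = p.length := by
  induction p with
  | nil => simp [fo]
  | cons y q ih =>
    have hyx : y ≠ x := fun e => h (by simp [e])
    have hx : x ∉ q := fun hx => h (List.mem_cons_of_mem _ hx)
    simp [fo, hyx, ih hx]

theorem fdup_append_not_mem (p : List Int) (x : Int) (h : x ∉ p) : fdup (p ++ [x]) = fdup p := by
  induction p with
  | nil => simp [fdup]
  | cons y q ih =>
    have hyx : y ≠ x := fun e => h (by simp [e])
    have hx : x ∉ q := fun hx => h (List.mem_cons_of_mem _ hx)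
    by_cases hyq : y ∈ q
    · simp [fdup, hyq]
    · have : y ∉ q ++ [x] := by simp [hyq, hyx]
      simp [fdup, this, hyq, ih hx]

theorem fdup_append_mem (p : List Int) (x : Int) (h : x ∈ p) :
    fdup (p ++ [x]) = some (match fdup p with | none => fo p x | some b => min (fo p x) b) := by
  induction p with
  | nil => cases h
  | cons y q ih =>
    by_cases hyx : y = x
    · subst hyx
      have h1 : y ∈ q ++ [y] := by simp
      simp only [List.cons_append, fdup, if_pos h1]
      simp only [fo, Nat.min_def]
      split <;> rfl
    · have hx : x ∈ q := (List.mem_cons.mp h).resolve_left (fun e => hyx e.symm)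
      by_cases hyq : y ∈ q
      · have h1 : y ∈ q ++ [x] := by simp [hyq]
        simp only [List.cons_append, fdup, if_pos h1, if_pos hyq]
        simp [fo, hyx]
      · have h1 : y ∉ q ++ [x] := by simp [hyq, hyx]
        simp only [List.cons_append, fdup, if_neg h1, if_neg hyq, ih hx, fo, if_neg hyx]
        rcases fdup q with _ | b <;> simp

theorem goB_main (l : List Int) (s : Int) (c : PySem.Dict Int Int)
    (h : ∀ y ∈ l, c.getD y 0 = (l.count y : Int)) :
    goB c (PySem.List.enumerate l s) = (fdup l).map (fun k => s + (k : Int)) := by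
  induction l generalizing s with
  | nil => simp [fdup, PySem.List.enumerate_nil, goB]
  | cons x xs ih =>
    rw [PySem.List.enumerate_cons]
    have hx : c.getD x 0 = ((xs.count x : Int) + 1) := by
      have := h x (by simp)
      simpa [List.count_cons_self] using this
    by_cases hmem : x ∈ xs
    · have hpos : 0 < xs.count x := List.count_pos_iff.mpr hmem
      have : c.getD x 0 > 1 := by omega
      simp [goB, this, fdup, hmem]
    · have hz : xs.count x = 0 := by
        rcases Nat.eq_zero_or_pos (xs.count x) with h0 | h0
        · exact h0
        · exact absurd (List.count_pos_iff.mp h0) hmem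
      have hngt : ¬ (c.getD x 0 > 1) := by omega
      have h' : ∀ y ∈ xs, c.getD y 0 = (xs.count y : Int) := by
        intro y hy
        have hyx : x ≠ y := fun e => hmem (e ▸ hy)
        have := h y (List.mem_cons_of_mem _ hy)
        simpa [List.count_cons, hyx] using this
      rw [goB, if_neg hngt, ih (s + 1) h']
      simp only [fdup, if_neg hmem]
      rcases fdup xs with _ | k
      · simp
      · simp
        omega

theorem goA_main (l : List Int) (p : List Int) (fi : PySem.Dict Int Int) (best : Option Int)
    (hfi : ∀ y, fi.get? y = if y ∈ p then some ((fo p y : Int)) else none)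
    (hbest : best = (fdup p).map (fun (k : Nat) => (k : Int))) :
    goA fi best (PySem.List.enumerate l (p.length : Int)) = (fdup (p ++ l)).map (fun (k : Nat) => (k : Int)) := by
  induction l generalizing p fi best with
  | nil =>
    subst hbest
    simp [PySem.List.enumerate_nil, goA]
  | cons x xs ih =>
    subst hbest
    rw [PySem.List.enumerate_cons]
    have hlen : (((p ++ [x]).length : Nat) : Int) = (p.length : Int) + 1 := by
      have h1 : (p ++ [x]).length = p.length + 1 := by simp
      rw [h1]; push_cast; ring
    by_cases hmem : x ∈ p
    · have hget : fi.get? x = some ((fo p x : Int)) := by rw [hfi x, if_pos hmem]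
      have hfi' : ∀ y, fi.get? y = if y ∈ p ++ [x] then some ((fo (p ++ [x]) y : Int)) else none := by
        intro y
        by_cases hy : y ∈ p
        · rw [hfi y, if_pos hy, if_pos (by simp [hy]), fo_append_mem p x y hy]
        · have hyx : y ≠ x := fun e => hy (e ▸ hmem)
          rw [hfi y, if_neg hy, if_neg (by simp [hy, hyx])]
      have hstep : ∀ (b' : Option Int), b' = (fdup (p ++ [x])).map (fun (k : Nat) => (k : Int)) →
          goA fi b' (PySem.List.enumerate xs ((p.length : Int) + 1))
            = (fdup (p ++ x :: xs)).map (fun (k : Nat) => (k : Int)) := by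
        intro b' hb'
        have hih := ih (p ++ [x]) fi b' hfi' hb'
        rw [hlen] at hih
        rw [hih]
        simp [List.append_assoc]
      simp only [goA, hget]
      rcases hfd : fdup p with _ | b
      · simp only [Option.map_none]
        apply hstep
        rw [fdup_append_mem p x hmem, hfd]
        rfl
      · simp only [Option.map_some]
        by_cases hlt : ((fo p x : Nat) : Int) < ((b : Nat) : Int)
        · rw [if_pos hlt]
          apply hstep
          rw [fdup_append_mem p x hmem, hfd]
          simp only [Option.map_some, Option.some.injEq]
          rw [Nat.min_def]
          split <;> omega
        · rw [if_neg hlt]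
          apply hstep
          rw [fdup_append_mem p x hmem, hfd]
          simp only [Option.map_some, Option.some.injEq]
          rw [Nat.min_def]
          split <;> omega
    · have hget : fi.get? x = none := by rw [hfi x, if_neg hmem]
      have hfi' : ∀ y, (fi.insert x (p.length : Int)).get? y
          = if y ∈ p ++ [x] then some ((fo (p ++ [x]) y : Int)) else none := by
        intro y
        rw [PySem.Dict.get?_insert]
        by_cases hyx : y = x
        · subst hyx
          rw [if_pos rfl, if_pos (by simp), fo_append_self p y hmem]
        · rw [if_neg hyx]
          by_cases hy : y ∈ p
          · rw [hfi y, if_pos hy, if_pos (by simp [hy]), fo_append_mem p x y hy]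
          · rw [hfi y, if_neg hy, if_neg (by simp [hy, hyx])]
      have hbest' : ((fdup p).map (fun k => ((k : Nat) : Int)))
          = (fdup (p ++ [x])).map (fun (k : Nat) => (k : Int)) := by
        rw [fdup_append_not_mem p x hmem]

      simp only [goA, hget]
      have hih := ih (p ++ [x]) (fi.insert x (p.length : Int)) _ hfi' hbest'
      rw [hlen] at hih
      rw [hih]
      simp [List.append_assoc]

-- ===== VERDICT (by name: the statement is the Claim_ definition above) =====
theorem find_min_index_of_repeating_spec : Claim_equal_find_min_index_of_repeating := by
  intro nums _
  unfold Spec_find_min_index_of_repeating find_min_index_of_repeating find_min_index_of_repeating_alt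
  have hA := goA_main nums [] PySem.Dict.empty none
    (by intro y; simp [PySem.Dict.get?_empty]) (by simp [fdup])
  have hB := goB_main nums 0 (nums.foldl (fun d x => d.insert x (d.getD x 0 + 1)) PySem.Dict.empty)
    (by
      intro y _
      rw [PySem.Dict.getD_foldl_insert_add_one]
      simp [PySem.Dict.getD_empty])
  simp only [List.length_nil, Nat.cast_zero, List.nil_append] at hA
  rw [hA, hB]
  rcases fdup nums with _ | k <;> simp
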